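-- pv_equiv track=rewrite | github.com/bbende134/thesis | functions.py | create_elapsed_time
-- ===== SOURCE A (Python) =====
-- def create_elapsed_time(time):
--     first_iter = True
--     for i,t in enumerate(time):
--         if first_iter:
--             t_earlier = t
--             time[i] = 0
--             first_iter = False
--         else:
--             t_later = t
--             time[i] = time[i-1] + t_later-t_earlier
--             t_earlier = t
--     return time
-- ===== SOURCE B (Python) =====
-- def create_elapsed_time(time):
--     # Closed form: each accumulated sum of consecutive differences telescopes
--     # to time[i] - time[0] (exact for integer timestamps).
--     # Mutates and returns the same list object, like A.
--     if time:
--         t0 = time[0]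
--         time[:] = [t - t0 for t in time]
--     return time
-- ===== Notes on version B (the rewrite author's own statement) =====
-- stated objective: simpler
-- what changed: A's stateful fused loop (first_iter flag, t_earlier carry, cumulative sum of consecutive differences) is replaced by the telescoped closed form: each element becomes its offset from the first timestamp via one map written back by slice assignment; exact for integer timestamps.
import Mathlib
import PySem

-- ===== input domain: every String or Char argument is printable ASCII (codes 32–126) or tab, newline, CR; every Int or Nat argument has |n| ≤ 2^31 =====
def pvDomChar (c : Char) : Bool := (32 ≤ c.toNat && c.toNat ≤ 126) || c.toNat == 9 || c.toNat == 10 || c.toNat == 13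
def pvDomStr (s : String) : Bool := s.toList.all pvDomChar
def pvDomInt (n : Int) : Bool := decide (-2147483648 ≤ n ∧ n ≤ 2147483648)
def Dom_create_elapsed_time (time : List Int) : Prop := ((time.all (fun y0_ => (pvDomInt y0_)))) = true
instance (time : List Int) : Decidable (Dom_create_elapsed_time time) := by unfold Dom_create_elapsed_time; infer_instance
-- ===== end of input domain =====

-- B replaces A's stateful cumulative loop by the telescoped closed form: each element minus the first element.
-- Both Pythons mutate the argument list in place and return it; the equivalence here is about the return value.
-- ===== PORT A =====
-- loop body after the first iteration: prev = time[i-1], te = t_earlier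
def createElapsedLoopA (prev te : Int) : List Int → List Int
  | [] => []
  | t :: rest => (prev + t - te) :: createElapsedLoopA (prev + t - te) t rest

def create_elapsed_time (time : List Int) : List Int :=
  match time with
  | [] => []
  | t0 :: rest => 0 :: createElapsedLoopA 0 t0 rest

-- ===== PORT B =====
def create_elapsed_time_alt (time : List Int) : List Int :=
  match time with
  | [] => time
  | t0 :: _ => time.map (fun t => t - t0)

-- ===== PRECONDITION & SPEC =====
def Spec_create_elapsed_time (time : List Int) (out : List Int) : Prop := out = create_elapsed_time_alt time
instance (time : List Int) (out : List Int) : Decidable (Spec_create_elapsed_time time out) := by unfold Spec_create_elapsed_time; infer_instance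

-- ===== CLAIM (what is proved, stated in full; the proofs are below) =====
def Claim_equal_create_elapsed_time : Prop := ∀ (time : List Int), Dom_create_elapsed_time time → Spec_create_elapsed_time time (create_elapsed_time time)

-- ===== LEMMAS AND PROOFS =====
theorem createElapsedLoopA_eq_map (l : List Int) : ∀ (prev te : Int),
    createElapsedLoopA prev te l = l.map (fun t => t - te + prev) := by
  induction l with
  | nil => intro prev te; simp [createElapsedLoopA]
  | cons t rest ih =>
      intro prev te
      simp only [createElapsedLoopA, List.map_cons, ih]
      refine congrArg₂ (· :: ·) (by ring) ?_
      apply List.map_congr_left; intro s _; ring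

-- ===== VERDICT (by name: the statement is the Claim_ definition above) =====
theorem create_elapsed_time_spec : Claim_equal_create_elapsed_time := by
  intro time _
  unfold Spec_create_elapsed_time
  cases time with
  | nil => rfl
  | cons t0 rest =>
      simp only [create_elapsed_time, create_elapsed_time_alt, List.map_cons,
        createElapsedLoopA_eq_map]
      refine congrArg₂ (· :: ·) (by ring) ?_
      apply List.map_congr_left; intro s _; ring
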